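-- pv_equiv track=rewrite | github.com/ajkbssn/uu-prog1 | src/uu_prog1/exam.py | predecessors
-- ===== SOURCE A (Python) =====
-- def predecessors(s):
--     """
--     takes a string s, splits the string into a list of words
--     (splits where there is a whitespace) and returns a dict with
--     all the words in the string as lower case keys and
--     the list of predecessing words in lowercase as values
--     """
--     lst = s.split()
--     dct = dict()
--     for i, w in enumerate(lst):
--         wl = w.lower()
--         if wl in dct.keys():
--             dct[wl].append(lst[i - 1].lower())
--         elif i == 0:
--             dct[wl] = [""]
--         else:
--             dct[wl] = [lst[i - 1].lower()]
--     return dct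
-- ===== SOURCE B (Python) =====
-- def predecessors(s):
--     words = [w.lower() for w in s.split()]
--     pairs = list(zip(words, [""] + words))
--     return {k: [p for w, p in pairs if w == k] for k in dict.fromkeys(words)}
-- ===== Notes on version B (the rewrite author's own statement) =====
-- stated objective: alternative
-- what changed: Replaces A's single mutating dict-building pass (enumerate with lst[i-1] back-indexing and contains/i==0 branching) by staged passes: lower all words once, pair each word with its predecessor via zip(words, [""]+words), take keys as the ordered dedup dict.fromkeys(words), and build each value by filtering the pair list per key in a dict comprehension.
import Mathlib
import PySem

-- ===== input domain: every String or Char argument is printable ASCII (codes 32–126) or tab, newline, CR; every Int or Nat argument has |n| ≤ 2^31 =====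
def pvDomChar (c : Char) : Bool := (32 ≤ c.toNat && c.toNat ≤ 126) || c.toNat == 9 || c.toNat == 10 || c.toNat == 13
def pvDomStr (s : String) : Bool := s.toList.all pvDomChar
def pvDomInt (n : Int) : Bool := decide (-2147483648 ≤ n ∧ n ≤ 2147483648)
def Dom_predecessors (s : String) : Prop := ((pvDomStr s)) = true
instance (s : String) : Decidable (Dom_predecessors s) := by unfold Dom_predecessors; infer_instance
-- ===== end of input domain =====

-- B replaces A's single mutating dict-building pass (back-indexing lst[i-1], contains/i==0
-- branches) by staged passes: lower the words once, zip each word with its predecessor,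
-- take the keys as the ordered dedup of the words, and filter the pair list per key.

-- ===== PORT A =====
-- loop body of A: for i, w in enumerate(lst): …
def stepA (lst : List String) (dct : PySem.Dict String (List String)) (p : Int × String) : PySem.Dict String (List String) :=
  let wl := PySem.Str.lower p.2
  if dct.contains wl then
    dct.modify wl [] (fun v => v ++ [PySem.Str.lower ((PySem.List.pyGet? lst (p.1 - 1)).getD "")])
  else if p.1 = 0 then dct.insert wl [""]
  else dct.insert wl [PySem.Str.lower ((PySem.List.pyGet? lst (p.1 - 1)).getD "")]
-- (lst[i-1] is ported with pyGet?; the `.getD ""` default is never taken: whenever the branch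
-- reading lst[i-1] runs the list is nonempty, so pyGet? is some — exactly as in Python)

def predecessors (s : String) : List (String × List String) :=
  let lst := PySem.Str.split₀ s
  ((PySem.List.enumerate lst).foldl (stepA lst) PySem.Dict.empty).items

-- ===== PORT B =====
def predecessors_alt (s : String) : List (String × List String) :=
  let words := (PySem.Str.split₀ s).map PySem.Str.lower
  let pairs := words.zip ("" :: words)
  (PySem.List.dedup words).map (fun k => (k, (pairs.filter (fun p => p.1 == k)).map (·.2)))

-- ===== PRECONDITION & SPEC =====
def Spec_predecessors (s : String) (out : List (String × List String)) : Prop := out = predecessors_alt s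
instance (s : String) (out : List (String × List String)) : Decidable (Spec_predecessors s out) := by unfold Spec_predecessors; infer_instance

-- ===== CLAIM (what is proved, stated in full; the proofs are below) =====
def Claim_equal_predecessors : Prop := ∀ (s : String), Dom_predecessors s → Spec_predecessors s (predecessors s)

-- ===== LEMMAS AND PROOFS =====

-- the grouping step both folds reduce to: d[cur] = d.get(cur, []) + [prev]
def stepG (d : PySem.Dict String (List String)) (p : String × String) : PySem.Dict String (List String) :=
  d.modify p.1 [] (fun v => v ++ [p.2])

-- A's remaining enumerate loop over the suffix xs of lst = front ++ x :: xs (indices from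
-- front.length + 1, so the i == 0 branch is dead) is the grouping fold over the lowered
-- (current, predecessor) pairs of x :: xs
lemma fold_agree : ∀ (xs front : List String) (x : String) (d : PySem.Dict String (List String)),
    (PySem.List.enumerate xs ((front.length : Int) + 1)).foldl (stepA (front ++ x :: xs)) d
    = ((xs.map PySem.Str.lower).zip (PySem.Str.lower x :: xs.map PySem.Str.lower)).foldl stepG d := by
  intro xs
  induction xs with
  | nil => intro front x d; simp [PySem.List.enumerate]
  | cons y ys ih =>
    intro front x d
    rw [PySem.List.enumerate_cons]
    have hget : PySem.List.pyGet? (front ++ x :: y :: ys) (((front.length : Int) + 1) - 1) = some x := by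
      have : ((front.length : Int) + 1) - 1 = (front.length : Int) := by ring
      rw [this, PySem.List.pyGet?_natCast]
      simp
    have hstep : stepA (front ++ x :: y :: ys) d ((front.length : Int) + 1, y)
        = stepG d (PySem.Str.lower y, PySem.Str.lower x) := by
      simp only [stepA, stepG, hget]
      by_cases hc : d.contains (PySem.Str.lower y)
      · rw [if_pos hc]; simp
      · rw [if_neg hc, if_neg (by positivity)]
        have hgd : d.getD (PySem.Str.lower y) [] = [] :=
          PySem.Dict.getD_of_not_contains d [] (by simpa using hc)
        simp [PySem.Dict.modify, hgd]
    simp only [List.foldl_cons, List.map_cons, List.zip_cons_cons, hstep]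
    have := ih (front ++ [x]) y (stepG d (PySem.Str.lower y, PySem.Str.lower x))
    simpa [List.append_assoc, add_assoc] using this

-- ===== VERDICT (by name: the statement is the Claim_ definition above) =====
theorem predecessors_spec : Claim_equal_predecessors := by
  intro s _
  unfold Spec_predecessors predecessors predecessors_alt
  cases h : PySem.Str.split₀ s with
  | nil => simp [PySem.List.enumerate, PySem.Dict.empty, PySem.List.dedup, PySem.Set.ofList]
  | cons w rest =>
    simp only []
    -- A's fold is the grouping fold over the lowered pairs
    rw [PySem.List.enumerate_cons]
    have h0 : stepA (w :: rest) PySem.Dict.empty (0, w)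
        = stepG PySem.Dict.empty (PySem.Str.lower w, "") := by
      simp [stepA, stepG, PySem.Dict.modify]
    have hfold : (PySem.List.enumerate (w :: rest)).foldl (stepA (w :: rest)) PySem.Dict.empty
        = (((w :: rest).map PySem.Str.lower).zip ("" :: (w :: rest).map PySem.Str.lower)).foldl
            stepG PySem.Dict.empty := by
      rw [PySem.List.enumerate_cons]
      simp only [List.foldl_cons, h0, List.map_cons, List.zip_cons_cons]
      have := fold_agree rest [] w (stepG PySem.Dict.empty (PySem.Str.lower w, ""))
      simpa using this
    rw [PySem.List.enumerate_cons] at hfold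
    rw [hfold]
    -- now both sides are about the grouping fold: keys are the ordered dedup, values the filters
    set words := (w :: rest).map PySem.Str.lower with hw
    set pairs := words.zip ("" :: words) with hp
    have hG : pairs.foldl stepG PySem.Dict.empty
        = pairs.foldl (fun d p => d.modify p.1 [] (fun v => v ++ [p.2])) PySem.Dict.empty := rfl
    have hnd : (pairs.foldl stepG PySem.Dict.empty).keys.Nodup := by
      rw [hG]
      exact PySem.Dict.nodup_keys_foldl_modify_key pairs Prod.fst [] (fun _ p v => v ++ [p.2])
        PySem.Dict.empty (by simp)
    have hfst : pairs.map Prod.fst = words := by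
      apply List.map_fst_zip
      simp
    have hkeys : (pairs.foldl stepG PySem.Dict.empty).keys = PySem.List.dedup words := by
      rw [hG]
      rw [PySem.Dict.keys_foldl_modify_key pairs Prod.fst [] (fun _ p v => v ++ [p.2]) PySem.Dict.empty]
      simp [hfst, PySem.List.dedup_eq_ofList, PySem.Set.update_nil_left]
    rw [PySem.Dict.items_eq_map_keys _ hnd [], hkeys]
    apply List.map_congr_left
    intro k _
    have := PySem.Dict.getD_foldl_modify_append pairs PySem.Dict.empty k
    rw [hG, this]
    simp
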